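-- pv_equiv track=rewrite | github.com/cinnak/aoc2023 | day14.py | process_column_simple
-- ===== SOURCE A (Python) =====
-- def process_column_simple(col):
--     total_load = 0
--     height = len(col)
--
--     # 用'#'分割列
--     sections = col.split('#')
--     current_pos = 0
--
--     # 处理每个区域
--     for section in sections:
--         rocks = section.count('O')  # 区域内的石头数量
--         # 计算这些石头的负载
--         for i in range(rocks):
--             load = height - (current_pos + i)
--             total_load += load
--         current_pos += len(section) + 1  # +1 是因为分割符'#'
--
--     return total_load
-- ===== SOURCE B (Python) =====
-- def process_column_simple(col):
--     height = len(col)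
--     total = 0
--     free = 0
--     for i, c in enumerate(col):
--         if c == 'O':
--             total += height - free
--             free += 1
--         elif c == '#':
--             free = i + 1
--     return total
-- ===== Notes on version B (the rewrite author's own statement) =====
-- stated objective: simpler
-- what changed: Replaces the split-into-sections structure (string split on the cube-rock separator plus an inner per-section range loop) with a single left-to-right scan that maintains the next landing position incrementally.
import Mathlib
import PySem

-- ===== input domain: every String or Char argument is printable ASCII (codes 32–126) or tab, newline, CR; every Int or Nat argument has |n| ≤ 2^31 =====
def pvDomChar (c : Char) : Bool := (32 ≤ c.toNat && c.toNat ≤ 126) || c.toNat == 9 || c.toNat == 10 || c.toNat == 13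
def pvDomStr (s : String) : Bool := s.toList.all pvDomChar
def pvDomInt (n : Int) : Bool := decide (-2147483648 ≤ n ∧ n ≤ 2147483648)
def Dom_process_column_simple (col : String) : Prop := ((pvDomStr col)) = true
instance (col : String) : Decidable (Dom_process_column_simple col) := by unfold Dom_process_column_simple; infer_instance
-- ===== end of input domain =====

-- B replaces A's split-into-sections / per-section rock-count structure with a single scan maintaining the next landing position; same O(n) cost, simpler structure.

-- ===== PORT A =====
-- A: split the column at cube rocks; for each section count the round rocks and sum their loads with an inner range loop.
def process_column_simple (col : String) : Int :=
  let height : Int := (col.toList.length : Int)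
  let sections := PySem.Chars.splitOn col.toList ['#']
  (sections.foldl
    (fun (st : Int × Int) sec =>
      ((PySem.List.pyRange 0 ((PySem.Chars.count sec ['O'] : Nat) : Int)).foldl
          (fun t i => t + (height - (st.2 + i))) st.1,
       st.2 + (sec.length : Int) + 1))
    (0, 0)).1

-- ===== PORT B =====
-- B: one enumerate pass; the second state component is the next landing position, reset past each cube rock.
def process_column_simple_alt (col : String) : Int :=
  let height : Int := (col.toList.length : Int)
  ((PySem.List.enumerate col.toList).foldl
    (fun (st : Int × Int) p =>
      if p.2 == 'O' then (st.1 + (height - st.2), st.2 + 1)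
      else if p.2 == '#' then (st.1, p.1 + 1)
      else st)
    (0, 0)).1

-- ===== PRECONDITION & SPEC =====
def Spec_process_column_simple (col : String) (out : Int) : Prop := out = process_column_simple_alt col
instance (col : String) (out : Int) : Decidable (Spec_process_column_simple col out) := by unfold Spec_process_column_simple; infer_instance

-- ===== CLAIM (what is proved, stated in full; the proofs are below) =====
def Claim_equal_process_column_simple : Prop := ∀ (col : String), Dom_process_column_simple col → Spec_process_column_simple col (process_column_simple col)

-- ===== LEMMAS AND PROOFS =====

-- The common value: total load of the rocks in cs, scanning at index i with next landing position free.
def pvSpec (h : Int) : List Char → Int → Int → Int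
  | [], _, _ => 0
  | c :: cs, i, free =>
    if c = 'O' then (h - free) + pvSpec h cs (i + 1) (free + 1)
    else if c = '#' then pvSpec h cs (i + 1) (i + 1)
    else pvSpec h cs (i + 1) free

-- What A's inner range-loop adds for k rocks starting at pos.
def pvLoads (h pos : Int) : Nat → Int
  | 0 => 0
  | k + 1 => pvLoads h pos k + (h - (pos + (k : Int)))

-- Functional model of Chars.splitOn cs ['#'], with pre the current partial piece.
def pvSplit (pre : List Char) : List Char → List (List Char)
  | [] => [pre]
  | c :: cs => if c = '#' then pre :: pvSplit [] cs else pvSplit (pre ++ [c]) cs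

theorem pvCountGo_single (v : Char) :
    ∀ (fuel : Nat) (l : List Char) (acc : Nat), l.length ≤ fuel →
      PySem.Chars.count.go [v] fuel l acc = acc + l.count v := by
  intro fuel
  induction fuel with
  | zero =>
    intro l acc hl
    cases l with
    | nil => simp [PySem.Chars.count.go]
    | cons c rest => simp at hl
  | succ n ih =>
    intro l acc hl
    cases l with
    | nil => simp [PySem.Chars.count.go]
    | cons c rest =>
      simp only [PySem.Chars.count.go]
      by_cases hc : c = v
      · subst hc
        simp only [List.isPrefixOf, BEq.rfl, Bool.true_and, if_true]
        rw [ih _ _ (by simpa using Nat.le_of_succ_le_succ hl)]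
        simp
        omega
      · have hp : ([v].isPrefixOf (c :: rest)) = false := by
          simp [List.isPrefixOf]
          exact fun h => absurd h.symm hc
        rw [hp]
        simp only [Bool.false_eq_true, if_false]
        rw [ih _ _ (by simpa using Nat.le_of_succ_le_succ hl)]
        simp [hc]

@[simp] theorem pvCount_single (v : Char) (l : List Char) :
    PySem.Chars.count l [v] = l.count v := by
  simp only [PySem.Chars.count]
  rw [if_neg (by simp)]
  simpa using pvCountGo_single v l.length l 0 le_rfl

theorem pvSplitGo (fuel : Nat) :
    ∀ (l cur : List Char) (acc : List (List Char)), l.length ≤ fuel →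
      PySem.Chars.splitOn.go ['#'] fuel l cur acc = acc.reverse ++ pvSplit cur.reverse l := by
  induction fuel with
  | zero =>
    intro l cur acc hl
    cases l with
    | nil => simp [PySem.Chars.splitOn.go, pvSplit]
    | cons c rest => simp at hl
  | succ n ih =>
    intro l cur acc hl
    cases l with
    | nil => simp [PySem.Chars.splitOn.go, pvSplit]
    | cons c rest =>
      simp only [PySem.Chars.splitOn.go]
      by_cases hc : c = '#'
      · subst hc
        rw [if_pos (by simp [List.isPrefixOf])]
        rw [ih _ _ _ (by simpa using Nat.le_of_succ_le_succ hl)]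
        simp [pvSplit]
      · rw [if_neg (by simp [List.isPrefixOf]; exact fun h => absurd h.symm hc)]
        rw [ih _ _ _ (by simpa using Nat.le_of_succ_le_succ hl)]
        simp [pvSplit, hc]

theorem pvSplitOn_eq (cs : List Char) :
    PySem.Chars.splitOn cs ['#'] = pvSplit [] cs := by
  simpa using pvSplitGo (cs.length + 1) cs [] [] (by omega)

theorem pvInner (h pos : Int) (k : Nat) :
    ∀ (total : Int),
      (PySem.List.pyRange 0 (k : Int)).foldl (fun t i => t + (h - (pos + i))) total
        = total + pvLoads h pos k := by
  induction k with
  | zero => intro total; simp [PySem.List.pyRange, pvLoads]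
  | succ n ih =>
    intro total
    have hsplit : PySem.List.pyRange 0 (((n : Int)) + 1)
        = PySem.List.pyRange 0 (n : Int) ++ [(n : Int)] := by
      rw [PySem.List.pyRange_one_append 0 (n : Int) ((n : Int) + 1) (by positivity) (by omega)]
      congr 1
      rw [PySem.List.pyRange_one_cons (by omega)]
      simp [PySem.List.pyRange]
    push_cast
    rw [hsplit, List.foldl_append, ih]
    simp only [List.foldl_cons, List.foldl_nil, pvLoads]
    ring

theorem pvMainA (h : Int) (cs : List Char) :
    ∀ (pre : List Char) (st : Int × Int),
      ((pvSplit pre cs).foldl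
        (fun (st : Int × Int) sec =>
          ((PySem.List.pyRange 0 ((PySem.Chars.count sec ['O'] : Nat) : Int)).foldl
              (fun t i => t + (h - (st.2 + i))) st.1,
           st.2 + (sec.length : Int) + 1)) st).1
      = st.1 + pvLoads h st.2 (pre.count 'O')
          + pvSpec h cs (st.2 + (pre.length : Int)) (st.2 + ((pre.count 'O' : Nat) : Int)) := by
  induction cs with
  | nil =>
    intro pre st
    simp only [pvSplit, List.foldl_cons, List.foldl_nil, pvSpec, pvCount_single]
    rw [pvInner]
    ring
  | cons c cs ih =>
    intro pre st
    by_cases hc : c = '#'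
    · subst hc
      rw [show pvSplit pre ('#' :: cs) = pre :: pvSplit [] cs from by simp [pvSplit]]
      rw [List.foldl_cons, ih]
      simp only [pvCount_single]
      rw [pvInner]
      simp only [pvSpec, reduceIte, List.count_nil, List.length_nil, Nat.cast_zero, pvLoads]
      push_cast
      ring_nf
    · rw [show pvSplit pre (c :: cs) = pvSplit (pre ++ [c]) cs from by simp [pvSplit, hc]]
      rw [ih]
      by_cases ho : c = 'O'
      · subst ho
        have h1 : (pre ++ ['O']).count 'O' = pre.count 'O' + 1 := by
          simp [List.count_append]
        rw [h1]
        simp only [pvSpec, reduceIte, List.length_append, List.length_singleton, pvLoads]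
        push_cast
        try ring_nf
      · have h1 : (pre ++ [c]).count 'O' = pre.count 'O' := by
          simp [List.count_append, ho]
        rw [h1]
        simp only [pvSpec, if_neg ho, if_neg hc, List.length_append, List.length_singleton]
        push_cast
        ring_nf

theorem pvMainB (h : Int) (cs : List Char) :
    ∀ (i total free : Int),
      ((PySem.List.enumerate cs i).foldl
        (fun (st : Int × Int) p =>
          if p.2 == 'O' then (st.1 + (h - st.2), st.2 + 1)
          else if p.2 == '#' then (st.1, p.1 + 1)
          else st) (total, free)).1
      = total + pvSpec h cs i free := by
  induction cs with
  | nil => intro i total free; simp [pvSpec, PySem.List.enumerate]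
  | cons c cs ih =>
    intro i total free
    rw [PySem.List.enumerate_cons, List.foldl_cons]
    by_cases ho : c = 'O'
    · subst ho
      simp only [pvSpec, beq_self_eq_true, if_true]
      rw [ih]
      ring
    · by_cases hc : c = '#'
      · subst hc
        have hb : (('#' : Char) == 'O') = false := by decide
        simp only [pvSpec, if_neg ho, hb, Bool.false_eq_true, if_false,
          beq_self_eq_true, if_true]
        rw [ih]
      · have h1 : (c == 'O') = false := by simp [ho]
        have h2 : (c == '#') = false := by simp [hc]
        simp only [pvSpec, if_neg ho, if_neg hc, h1, h2, Bool.false_eq_true, if_false]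
        rw [ih]

-- ===== VERDICT (by name: the statement is the Claim_ definition above) =====
theorem process_column_simple_spec : Claim_equal_process_column_simple := by
  intro col _
  unfold Spec_process_column_simple process_column_simple process_column_simple_alt
  rw [pvSplitOn_eq, pvMainA, pvMainB]
  simp [pvLoads]
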